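-- pv_equiv track=rewrite | github.com/Sierraki/Solutions | 力扣&Leetcode/算法&algorithm/题库/LCP 77.符文储备.py | runeReserve
-- ===== SOURCE A (Python) =====
-- from typing import List
--
-- def runeReserve(runes: List[int]) -> int:
--     if len(runes) == 1:
--         return 1
--     runes.sort()
--     cnt = 1
--     mx = 0
--     for i in range(1, len(runes)):
--         if abs(runes[i] - runes[i - 1]) <= 1:
--             cnt += 1
--         else:
--             cnt = 1
--         mx = max(mx, cnt)
--     return mx
-- ===== SOURCE B (Python) =====
-- from typing import List
--
-- def runeReserve(runes: List[int]) -> int: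
--     # Counter + hash chaining instead of sort + adjacent scan.
--     # (Unlike A, this does not sort the input list in place.)
--     cnt = {}
--     for r in runes:
--         cnt[r] = cnt.get(r, 0) + 1
--     best = 0
--     for v in cnt:
--         if v - 1 not in cnt:
--             total = 0
--             w = v
--             while w in cnt:
--                 total += cnt[w]
--                 w += 1
--             best = max(best, total)
--     return best
-- ===== Notes on version B (the rewrite author's own statement) =====
-- stated objective: alternative
-- what changed: Replaces the in-place sort plus adjacent-difference scan with a value->count dictionary: for each distinct value whose predecessor is absent, walk up the consecutive chain summing counts and keep the maximum (note: A sorts its argument in place, B does not mutate it; the proved equivalence is about the return value).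
import Mathlib
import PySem

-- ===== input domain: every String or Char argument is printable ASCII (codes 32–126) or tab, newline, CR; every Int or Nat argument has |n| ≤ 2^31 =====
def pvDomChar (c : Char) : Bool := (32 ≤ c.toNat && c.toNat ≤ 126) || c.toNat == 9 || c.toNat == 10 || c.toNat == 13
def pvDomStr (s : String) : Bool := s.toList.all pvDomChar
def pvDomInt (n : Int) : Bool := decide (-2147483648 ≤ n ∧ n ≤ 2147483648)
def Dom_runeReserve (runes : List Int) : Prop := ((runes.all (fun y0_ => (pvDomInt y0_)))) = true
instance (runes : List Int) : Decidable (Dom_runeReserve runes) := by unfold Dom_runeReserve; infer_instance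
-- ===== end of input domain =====

-- B replaces A's in-place sort + adjacent scan by a value→count dictionary with upward chain
-- walking (objective: alternative algorithm; A sorts its argument in place, B does not mutate it —
-- the equivalence proved here is about the return value).

-- ===== PORT A =====
-- the 'for i in range(1, len(runes))' loop over the sorted list, carrying runes[i-1] as prev
def pvLoopA (prev : Int) (xs : List Int) (cnt mx : Int) : Int :=
  match xs with
  | [] => mx
  | x :: rest =>
    let c : Int := if |x - prev| ≤ 1 then cnt + 1 else 1
    pvLoopA x rest c (max mx c)

def runeReserve (runes : List Int) : Int :=
  if runes.length = 1 then 1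
  else
    match PySem.List.sorted runes (fun x => x) false with
    | [] => 0
    | a :: rest => pvLoopA a rest 1 0

-- ===== PORT B =====
-- the 'while w in cnt' walk; the fuel (#keys + 1) only makes the recursion total: it strictly
-- exceeds the length of any chain of distinct present keys, so it is never exhausted
def pvChainB (d : PySem.Dict Int Int) : Nat → Int → Int → Int
  | 0, _, total => total
  | fuel + 1, w, total =>
    if d.contains w then pvChainB d fuel (w + 1) (total + d.getD w 0) else total

def runeReserve_alt (runes : List Int) : Int :=
  let d := runes.foldl (fun d r => d.insert r (d.getD r 0 + 1)) PySem.Dict.empty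
  d.keys.foldl
    (fun best v =>
      if d.contains (v - 1) then best
      else max best (pvChainB d (d.keys.length + 1) v 0))
    0

-- ===== PRECONDITION & SPEC =====
def Spec_runeReserve (runes : List Int) (out : Int) : Prop := out = runeReserve_alt runes
instance (runes : List Int) (out : Int) : Decidable (Spec_runeReserve runes out) := by unfold Spec_runeReserve; infer_instance

-- ===== CLAIM (what is proved, stated in full; the proofs are below) =====
def Claim_equal_runeReserve : Prop := ∀ (runes : List Int), Dom_runeReserve runes → Spec_runeReserve runes (runeReserve runes)

-- ===== LEMMAS AND PROOFS =====

-- split a sorted list into its first run (maximal prefix with adjacent gaps ≤ 1) and the rest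
def runSplit (prev : Int) : List Int → List Int × List Int
  | [] => ([], [])
  | x :: xs =>
    if |x - prev| ≤ 1 then
      let p := runSplit x xs
      (x :: p.1, p.2)
    else ([], x :: xs)

theorem runSplit_snd_length (prev : Int) (xs : List Int) :
    (runSplit prev xs).2.length ≤ xs.length := by
  induction xs generalizing prev with
  | nil => simp [runSplit]
  | cons x xs ih =>
    simp only [runSplit]
    split
    · exact Nat.le_succ_of_le (ih x)
    · simp

-- the maximal run length of a sorted list (A's specification value)
def runsMax : List Int → Int
  | [] => 0
  | a :: xs =>
    max (((runSplit a xs).1.length : Int) + 1) (runsMax (runSplit a xs).2)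
  termination_by l => l.length
  decreasing_by
    simpa using Nat.lt_succ_of_le (runSplit_snd_length a xs)

-- decomposition: a list is its first run followed by the rest
theorem runSplit_append (prev : Int) (xs : List Int) :
    prev :: xs = (prev :: (runSplit prev xs).1) ++ (runSplit prev xs).2 := by
  induction xs generalizing prev with
  | nil => simp [runSplit]
  | cons x xs ih =>
    simp only [runSplit]
    split
    · simpa using ih x
    · simp

-- on a sorted list the first run's values are exactly an interval [prev, q], and the rest ≥ q+2
theorem runSplit_interval (prev : Int) (xs : List Int)
    (h : (prev :: xs).Pairwise (· ≤ ·)) :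
    ∃ q : Int, prev ≤ q ∧
      (∀ y : Int, y ∈ prev :: (runSplit prev xs).1 ↔ prev ≤ y ∧ y ≤ q) ∧
      (∀ z ∈ (runSplit prev xs).2, q + 2 ≤ z) := by
  induction xs generalizing prev with
  | nil =>
    refine ⟨prev, le_refl _, ?_, ?_⟩
    · intro y; simp [runSplit]; omega
    · intro z hz; simp [runSplit] at hz
  | cons x xs ih =>
    rw [List.pairwise_cons] at h
    obtain ⟨hpx, hx⟩ := h
    have hpxle : prev ≤ x := hpx x List.mem_cons_self
    by_cases habs : |x - prev| ≤ 1
    · obtain ⟨q, hq1, hq2, hq3⟩ := ih x hx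
      have hxq : x ≤ q := ((hq2 x).mp List.mem_cons_self).2
      have hxp1 : x ≤ prev + 1 := by
        rw [abs_le] at habs; omega
      refine ⟨q, by omega, ?_, ?_⟩
      · intro y
        simp only [runSplit, if_pos habs, List.mem_cons]
        have h2 := hq2 y
        simp only [List.mem_cons] at h2
        constructor
        · rintro (rfl | hy)
          · omega
          · have := h2.mp hy; omega
        · intro hy
          by_cases hyx : x ≤ y
          · exact Or.inr (h2.mpr ⟨hyx, hy.2⟩)
          · left; omega
      · intro z hz
        simp only [runSplit, if_pos habs] at hz
        exact hq3 z hz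
    · have hgap : prev + 2 ≤ x := by
        rw [abs_le] at habs; omega
      refine ⟨prev, le_refl _, ?_, ?_⟩
      · intro y
        simp only [runSplit, if_neg habs, List.mem_cons]
        constructor
        · rintro (rfl | hy)
          · omega
          · simp at hy
        · intro hy; left; omega
      · intro z hz
        simp only [runSplit, if_neg habs] at hz
        rcases List.mem_cons.mp hz with rfl | hz
        · omega
        · have hxz : x ≤ z := (List.pairwise_cons.mp hx).1 z hz
          omega

-- A's loop invariant
theorem pvLoopA_eq (xs : List Int) : ∀ (prev cnt mx : Int), 1 ≤ cnt → cnt ≤ max mx 1 →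
    xs ≠ [] →
    pvLoopA prev xs cnt mx =
      max mx (max (cnt + ((runSplit prev xs).1.length : Int)) (runsMax (runSplit prev xs).2)) := by
  induction xs with
  | nil => intro _ _ _ _ _ hne; exact absurd rfl hne
  | cons x xs ih =>
    intro prev cnt mx h1 h2 _
    by_cases habs : |x - prev| ≤ 1
    · simp only [pvLoopA, runSplit, if_pos habs]
      cases xs with
      | nil =>
        simp only [pvLoopA, runSplit, runsMax]
        simp
        omega
      | cons y ys =>
        rw [ih x (cnt + 1) (max mx (cnt + 1)) (by omega) (by omega) (List.cons_ne_nil y ys)]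
        simp only [List.length_cons]
        push_cast
        omega
    · simp only [pvLoopA, runSplit, if_neg habs]
      cases xs with
      | nil =>
        simp only [pvLoopA, runsMax, runSplit]
        simp
        omega
      | cons y ys =>
        rw [ih x 1 (max mx 1) (by omega) (by omega) (List.cons_ne_nil y ys)]
        rw [show runsMax (x :: y :: ys) =
          max (((runSplit x (y :: ys)).1.length : Int) + 1) (runsMax (runSplit x (y :: ys)).2) from by
            rw [runsMax]]
        simp only [List.length_nil]
        push_cast
        omega

-- A computes runsMax of the sorted list
theorem runeReserve_eq_runsMax (runes : List Int) :
    runeReserve runes = runsMax (PySem.List.sorted runes (fun x => x) false) := by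
  unfold runeReserve
  by_cases hlen : runes.length = 1
  · rw [if_pos hlen]
    have hs : (PySem.List.sorted runes (fun x => x) false).length = 1 := by
      rw [PySem.List.length_sorted]; exact hlen
    obtain ⟨y, hy⟩ := List.length_eq_one_iff.mp hs
    rw [hy]
    simp [runsMax, runSplit]
  · rw [if_neg hlen]
    cases hsl : PySem.List.sorted runes (fun x => x) false with
    | nil => simp [runsMax]
    | cons a rest =>
      cases rest with
      | nil =>
        exfalso
        apply hlen
        have := PySem.List.length_sorted (xs := runes) (key := fun x => x) (rev := false)
        rw [hsl] at this
        simpa using this.symm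
      | cons b bs =>
        show pvLoopA b bs (if |b - a| ≤ 1 then 1 + 1 else 1)
            (max 0 (if |b - a| ≤ 1 then 1 + 1 else 1)) = runsMax (a :: b :: bs)
        rw [← show pvLoopA a (b :: bs) 1 0 = pvLoopA b bs (if |b - a| ≤ 1 then 1 + 1 else 1)
            (max 0 (if |b - a| ≤ 1 then 1 + 1 else 1)) from rfl]
        rw [pvLoopA_eq (b :: bs) a 1 0 (by omega) (by omega) (List.cons_ne_nil b bs)]
        rw [show runsMax (a :: b :: bs) =
          max (((runSplit a (b :: bs)).1.length : Int) + 1) (runsMax (runSplit a (b :: bs)).2) from by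
            rw [runsMax]]
        omega

-- ----- B side -----

def gB (d : PySem.Dict Int Int) (v : Int) : Int :=
  if d.contains (v - 1) then 0 else pvChainB d (d.keys.length + 1) v 0

def mB (d : PySem.Dict Int Int) (l : List Int) : Int :=
  l.foldr (fun v b => max (gB d v) b) 0

theorem mB_nonneg (d : PySem.Dict Int Int) (l : List Int) : 0 ≤ mB d l := by
  induction l with
  | nil => simp [mB]
  | cons v l ih => simp only [mB, List.foldr] at *; exact le_trans ih (le_max_right _ _)

theorem mB_le_iff (d : PySem.Dict Int Int) (l : List Int) (c : Int) :
    mB d l ≤ c ↔ 0 ≤ c ∧ ∀ v ∈ l, gB d v ≤ c := by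
  induction l with
  | nil => simp [mB]
  | cons v l ih =>
    simp only [mB, List.foldr, max_le_iff, List.mem_cons] at *
    constructor
    · rintro ⟨h1, h2⟩
      rcases ih.mp h2 with ⟨h0, hall⟩
      refine ⟨h0, fun w hw => ?_⟩
      rcases hw with rfl | hw
      · exact h1
      · exact hall w hw
    · rintro ⟨h0, hall⟩
      exact ⟨hall v (Or.inl rfl), ih.mpr ⟨h0, fun w hw => hall w (Or.inr hw)⟩⟩

theorem mB_append (d : PySem.Dict Int Int) (l₁ l₂ : List Int) :
    mB d (l₁ ++ l₂) = max (mB d l₁) (mB d l₂) := by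
  induction l₁ with
  | nil =>
    simp only [mB, List.nil_append, List.foldr]
    exact (max_eq_right (mB_nonneg d l₂)).symm
  | cons v l ih => simp only [mB, List.foldr, List.cons_append] at *; rw [ih, max_assoc]

theorem mB_mem_congr (d : PySem.Dict Int Int) (l l' : List Int)
    (h : ∀ v : Int, v ∈ l ↔ v ∈ l') : mB d l = mB d l' := by
  apply le_antisymm
  · exact (mB_le_iff d l _).mpr ⟨mB_nonneg d l', fun v hv =>
      le_trans (by rfl) (((mB_le_iff d l' _).mp (le_refl _)).2 v ((h v).mp hv))⟩
  · exact (mB_le_iff d l' _).mpr ⟨mB_nonneg d l, fun v hv =>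
      ((mB_le_iff d l _).mp (le_refl _)).2 v ((h v).mpr hv)⟩

-- B's outer fold is a running max of gB
theorem foldl_best_eq (d : PySem.Dict Int Int) (l : List Int) : ∀ b : Int, 0 ≤ b →
    l.foldl
      (fun best v =>
        if d.contains (v - 1) then best
        else max best (pvChainB d (d.keys.length + 1) v 0)) b = max b (mB d l) := by
  induction l with
  | nil => intro b hb; simp [mB, max_eq_left hb]
  | cons v l ih =>
    intro b hb
    simp only [List.foldl]
    by_cases hc : d.contains (v - 1)
    · rw [if_pos hc, ih b hb]
      have hg : gB d v = 0 := by simp [gB, hc]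
      have h0 := mB_nonneg d l
      simp only [mB, List.foldr, hg] at *
      rw [max_eq_right h0]
    · rw [if_neg hc, ih _ (le_trans hb (le_max_left _ _))]
      have hg : gB d v = pvChainB d (d.keys.length + 1) v 0 := by simp [gB, hc]
      simp only [mB, List.foldr, ← hg]
      rw [max_assoc]

-- chain walk: fuel large enough, presence up to j, absence at j
theorem pvChainB_eq (d : PySem.Dict Int Int) (j : Nat) : ∀ (fuel : Nat) (w total : Int),
    j < fuel → (∀ i : Nat, i < j → d.contains (w + (i : Int)) = true) →
    d.contains (w + (j : Int)) = false →
    pvChainB d fuel w total =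
      total + ((List.range j).map (fun (i : Nat) => d.getD (w + (i : Int)) 0)).sum := by
  induction j with
  | zero =>
    intro fuel w total hfuel hall habs
    cases fuel with
    | zero => omega
    | succ f =>
      simp only [Int.natCast_zero, add_zero] at habs
      simp [pvChainB, habs]
  | succ j ih =>
    intro fuel w total hfuel hall habs
    cases fuel with
    | zero => omega
    | succ f =>
      have hw : d.contains w = true := by
        have := hall 0 (Nat.succ_pos j)
        simpa using this
      have hrec := ih f (w + 1) (total + d.getD w 0) (by omega)
        (fun i hi => by
          have := hall (i + 1) (by omega)
          have he : w + ((i : Int) + 1) = w + 1 + (i : Int) := by ring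
          push_cast at this
          rw [he] at this
          exact this)
        (by
          have he : w + ((j : Int) + 1) = w + 1 + (j : Int) := by ring
          push_cast at habs
          rw [he] at habs
          exact habs)
      simp only [pvChainB, hw, if_pos]
      rw [hrec, List.range_succ_eq_map, List.map_cons, List.sum_cons, List.map_map]
      have hcg : ∀ i ∈ List.range j,
          ((fun (i : Nat) => d.getD (w + (i : Int)) 0) ∘ Nat.succ) i =
          (fun (i : Nat) => d.getD (w + 1 + (i : Int)) 0) i := by
        intro i _
        simp only [Function.comp]
        congr 1
        push_cast
        ring
      rw [List.map_congr_left hcg]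
      simp
      ring

-- counting a value that occurs once in an integer range
theorem sum_ite_range (x p : Int) (j : Nat) (h1 : p ≤ x) (h2 : x < p + (j : Int)) :
    ((List.range j).map (fun (i : Nat) => if x = p + (i : Int) then (1 : Int) else 0)).sum = 1 := by
  induction j with
  | zero => simp at h2; omega
  | succ j ih =>
    rw [List.range_succ, List.map_append, List.sum_append]
    by_cases hx : x = p + (j : Int)
    · have hz : ((List.range j).map (fun (i : Nat) => if x = p + (i : Int) then (1 : Int) else 0)).sum = 0 := by
        apply List.sum_eq_zero
        intro y hy
        simp only [List.mem_map, List.mem_range] at hy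
        obtain ⟨i, hij, rfl⟩ := hy
        have : ¬ (x = p + (i : Int)) := by omega
        simp [this]
      rw [hz]
      simp [hx]
    · have hlt : x < p + (j : Int) := by push_cast at h2 ⊢; omega
      simp [ih hlt, hx]

-- a list inside [p, p+j) has length = sum of its value counts over that range
theorem length_eq_sum_count (l : List Int) (p : Int) (j : Nat)
    (h : ∀ x ∈ l, p ≤ x ∧ x < p + (j : Int)) :
    ((List.range j).map (fun (i : Nat) => (l.count (p + (i : Int)) : Int))).sum = (l.length : Int) := by
  induction l with
  | nil => simp
  | cons x l ih =>
    have hpt : ∀ i : Nat, ((x :: l).count (p + (i : Int)) : Int) =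
        (l.count (p + (i : Int)) : Int) + (if x = p + (i : Int) then 1 else 0) := by
      intro i
      rw [List.count_cons]
      by_cases hx : x = p + (i : Int)
      · simp [hx]
      · have hx' : ¬ (p + (i : Int) = x) := fun hh => hx hh.symm
        simp [hx]
    rw [List.map_congr_left (fun i _ => hpt i), PySem.List.sum_map_add_int,
      ih (fun y hy => h y (List.mem_cons_of_mem x hy)),
      sum_ite_range x p j (h x List.mem_cons_self).1 (h x List.mem_cons_self).2]
    simp

-- master lemma: over any sorted list matching the dictionary, B's max equals runsMax
theorem mB_eq_runsMax (d : PySem.Dict Int Int) :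
    ∀ (s : List Int), s.Pairwise (· ≤ ·) →
    (∀ u : Int, (∃ x ∈ s, x ≤ u + 1) →
      d.contains u = decide (u ∈ s) ∧ d.getD u 0 = (s.count u : Int)) →
    mB d s = runsMax s := by
  suffices main : ∀ (n : Nat) (s : List Int), s.length ≤ n → s.Pairwise (· ≤ ·) →
      (∀ u : Int, (∃ x ∈ s, x ≤ u + 1) →
        d.contains u = decide (u ∈ s) ∧ d.getD u 0 = (s.count u : Int)) →
      mB d s = runsMax s by
    intro s hsort H
    exact main s.length s (le_refl _) hsort H
  intro n
  induction n with
  | zero =>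
    intro s hs _ _
    rw [List.length_eq_zero_iff.mp (Nat.le_zero.mp hs)]
    simp [mB, runsMax]
  | succ n ihn =>
    intro s hs hsort H
    cases s with
    | nil => simp [mB, runsMax]
    | cons p xs =>
      obtain ⟨q, hq1, hq2, hq3⟩ := runSplit_interval p xs hsort
      have hdecomp : p :: xs = (p :: (runSplit p xs).1) ++ (runSplit p xs).2 :=
        runSplit_append p xs
      set u := (runSplit p xs).1 with hu
      set r := (runSplit p xs).2 with hr
      -- membership of the whole list
      have hmem_all : ∀ y : Int, y ∈ p :: xs ↔ ((p ≤ y ∧ y ≤ q) ∨ y ∈ r) := by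
        intro y
        rw [hdecomp, List.mem_append, hq2 y]
      -- counts split
      have hcount_all : ∀ y : Int, (p :: xs).count y = (p :: u).count y + r.count y := by
        intro y
        rw [hdecomp, List.count_append]
      have hcount_pu_zero : ∀ y : Int, q + 1 ≤ y → (p :: u).count y = 0 := by
        intro y hy
        exact List.count_eq_zero.mpr (fun hmem => by have := (hq2 y).mp hmem; omega)
      have hcount_r_zero : ∀ y : Int, y ≤ q + 1 → r.count y = 0 := by
        intro y hy
        exact List.count_eq_zero.mpr (fun hmem => by have := hq3 y hmem; omega)
      -- the subsidiary sorted list r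
      have hsub : r.Sublist (p :: xs) := by
        rw [hdecomp]; exact List.sublist_append_right _ _
      have hsortr : r.Pairwise (· ≤ ·) := hsort.sublist hsub
      have hlenr : r.length ≤ n := by
        have h1 : r.length ≤ xs.length := by rw [hr]; exact runSplit_snd_length p xs
        have h2 : (p :: xs).length ≤ n + 1 := hs
        simp only [List.length_cons] at h2
        omega
      have Hr : ∀ u' : Int, (∃ x ∈ r, x ≤ u' + 1) →
          d.contains u' = decide (u' ∈ r) ∧ d.getD u' 0 = (r.count u' : Int) := by
        rintro u' ⟨x, hxr, hxle⟩
        have hx2 : q + 2 ≤ x := hq3 x hxr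
        have hu'ge : q + 1 ≤ u' := by omega
        have hxs : x ∈ p :: xs := hsub.mem hxr
        obtain ⟨hc, hg⟩ := H u' ⟨x, hxs, hxle⟩
        constructor
        · rw [hc]
          rw [decide_eq_decide]
          rw [hmem_all u']
          constructor
          · rintro (h | h)
            · omega
            · exact h
          · exact Or.inr
        · rw [hg, hcount_all u', hcount_pu_zero u' hu'ge]
          simp
      have hmBr : mB d r = runsMax r := ihn r hlenr hsortr Hr
      -- the chain length
      set j : Nat := (q + 1 - p).toNat with hj
      have hjval : (j : Int) = q + 1 - p := Int.toNat_of_nonneg (by omega)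
      have Hin : ∀ i : Nat, i < j → d.contains (p + (i : Int)) = true := by
        intro i hi
        have hilt : (i : Int) < (j : Int) := by exact_mod_cast hi
        have hmem : (p + (i : Int)) ∈ p :: xs :=
          (hmem_all _).mpr (Or.inl ⟨by omega, by omega⟩)
        rw [(H (p + (i : Int)) ⟨p + (i : Int), hmem, by omega⟩).1]
        simp [hmem]
      have Habs : d.contains (p + (j : Int)) = false := by
        have hnot : (p + (j : Int)) ∉ p :: xs := by
          rw [hmem_all]
          rintro (h | h)
          · omega
          · have := hq3 _ h; omega
        rw [(H (p + (j : Int)) ⟨p, List.mem_cons_self, by omega⟩).1]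
        simp [hnot]
      have hfuel : j < d.keys.length + 1 := by
        have hnodup : ((List.range j).map (fun (i : Nat) => p + (i : Int))).Nodup := by
          refine List.Nodup.map ?_ List.nodup_range
          intro a b hab
          simpa using hab
        have hsubk : ((List.range j).map (fun (i : Nat) => p + (i : Int))) ⊆ d.keys := by
          intro y hy
          simp only [List.mem_map, List.mem_range] at hy
          obtain ⟨i, hij, rfl⟩ := hy
          exact (PySem.Dict.contains_iff_mem_keys d _).mp (Hin i hij)
        have := (hnodup.subperm hsubk).length_le
        simp only [List.length_map, List.length_range] at this
        omega
      -- the chain value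
      have hsum : ((List.range j).map (fun (i : Nat) => d.getD (p + (i : Int)) 0)).sum
          = ((p :: u).length : Int) := by
        have hcg : ∀ i ∈ List.range j,
            d.getD (p + (i : Int)) 0 = ((p :: u).count (p + (i : Int)) : Int) := by
          intro i hi
          rw [List.mem_range] at hi
          have hilt : (i : Int) < (j : Int) := by exact_mod_cast hi
          have hmem : (p + (i : Int)) ∈ p :: xs :=
            (hmem_all _).mpr (Or.inl ⟨by omega, by omega⟩)
          rw [(H (p + (i : Int)) ⟨p + (i : Int), hmem, by omega⟩).2,
            hcount_all, hcount_r_zero _ (by omega)]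
          simp
        rw [List.map_congr_left hcg]
        exact length_eq_sum_count (p :: u) p j
          (fun y hy => ⟨((hq2 y).mp hy).1, by have := ((hq2 y).mp hy).2; omega⟩)
      have hgBp : gB d p = ((p :: u).length : Int) := by
        have hpm1 : (p - 1) ∉ p :: xs := by
          rw [hmem_all]
          rintro (h | h)
          · omega
          · have := hq3 _ h; omega
        have hcpm1 : d.contains (p - 1) = false := by
          rw [(H (p - 1) ⟨p, List.mem_cons_self, by omega⟩).1]
          simp [hpm1]
        rw [gB, if_neg (by simp [hcpm1]), pvChainB_eq d j (d.keys.length + 1) p 0 hfuel Hin Habs,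
          hsum]
        simp
      -- gB vanishes on the rest of the first run
      have hgB0 : ∀ v ∈ p :: u, v ≠ p → gB d v = 0 := by
        intro v hv hvp
        have hvq := (hq2 v).mp hv
        have hvm : (v - 1) ∈ p :: xs := (hmem_all _).mpr (Or.inl ⟨by omega, by omega⟩)
        have : d.contains (v - 1) = true := by
          rw [(H (v - 1) ⟨v, (hmem_all v).mpr (Or.inl ⟨by omega, by omega⟩), by omega⟩).1]
          simp [hvm]
        simp [gB, this]
      -- mB of the first run is its length
      have hmBpu : mB d (p :: u) = ((p :: u).length : Int) := by
        apply le_antisymm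
        · refine (mB_le_iff d (p :: u) _).mpr ⟨by positivity, fun v hv => ?_⟩
          by_cases hvp : v = p
          · subst hvp; rw [hgBp]
          · rw [hgB0 v hv hvp]; positivity
        · rw [← hgBp]
          exact ((mB_le_iff d (p :: u) _).mp (le_refl _)).2 p List.mem_cons_self
      -- assemble
      rw [show mB d (p :: xs) = mB d ((p :: u) ++ r) from by rw [← hdecomp],
        mB_append, hmBpu, hmBr,
        show runsMax (p :: xs) = max (((runSplit p xs).1.length : Int) + 1)
          (runsMax (runSplit p xs).2) from by rw [runsMax]]
      simp only [← hu, ← hr, List.length_cons]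
      push_cast
      ring_nf

-- ===== VERDICT (by name: the statement is the Claim_ definition above) =====
theorem runeReserve_spec : Claim_equal_runeReserve := by
  intro runes _
  show runeReserve runes = runeReserve_alt runes
  have hd : runes.foldl (fun d r => d.insert r (d.getD r 0 + 1)) PySem.Dict.empty
      = PySem.Dict.counter runes := PySem.Dict.foldl_insert_getD_add_one_eq_counter runes
  set s := PySem.List.sorted runes (fun x => x) false with hs
  have hsmem : ∀ v : Int, v ∈ s ↔ v ∈ runes := fun v =>
    PySem.List.mem_sorted runes (fun x => x) false v
  have hscount : ∀ v : Int, s.count v = runes.count v := fun v =>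
    (PySem.List.sorted_perm runes (fun x => x) false).count_eq v
  have hsort : s.Pairwise (· ≤ ·) := PySem.List.sorted_pairwise runes (fun x => x)
  set d := PySem.Dict.counter (κ := Int) runes with hdd
  have H : ∀ u : Int, (∃ x ∈ s, x ≤ u + 1) →
      d.contains u = decide (u ∈ s) ∧ d.getD u 0 = (s.count u : Int) := by
    intro v _
    constructor
    · rw [hdd, PySem.Dict.contains_counter]
      simp [hsmem v]
    · rw [hdd, PySem.Dict.getD_counter, hscount v]
  rw [runeReserve_eq_runsMax, ← hs, ← mB_eq_runsMax d s hsort H]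
  have hkeys : d.keys = PySem.Set.ofList runes := by rw [hdd, PySem.Dict.keys_counter]
  simp only [runeReserve_alt]
  rw [hd, foldl_best_eq d d.keys 0 (le_refl 0),
    max_eq_right (mB_nonneg d d.keys)]
  apply mB_mem_congr
  intro v
  rw [hkeys, PySem.Set.mem_ofList, hsmem v]
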